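-- pv_equiv track=rewrite | github.com/Aasthaengg/IBMdataset | Python_codes/p02891/s713546902.py | solver2
-- ===== SOURCE A (Python) =====
-- def solver2(s, k):
--     t = []
--     for _ in range(k):
--         t += s
--     res = 0
--     cnt = 1
--     for i in range(1, len(t)):
--         if t[i] == t[i - 1]:
--             cnt += 1
--         else:
--             res += cnt // 2
--             cnt = 1
--     res += cnt // 2
--     return res
-- ===== SOURCE B (Python) =====
-- def _f(s):
--     # floor(run/2) summed over the adjacent-equal runs of a nonempty string
--     res = 0
--     cnt = 1
--     prev = s[0]
--     for c in s[1:]: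
--         if c == prev:
--             cnt += 1
--         else:
--             res += cnt // 2
--             cnt = 1
--         prev = c
--     return res + cnt // 2
--
-- def solver2(s, k):
--     if not s or k <= 0:
--         return 0
--     c0 = s[0]
--     if all(c == c0 for c in s):
--         return (len(s) * k) // 2
--     base = _f(s)
--     return base + (k - 1) * (_f(s + s) - base)
-- ===== Notes on version B (the rewrite author's own statement) =====
-- stated objective: faster
-- what changed: B never materialises the k-fold repetition: it scans s once (and s+s once) and scales the single-copy run count by k with a seam correction, special-casing the all-equal string.
import Mathlib
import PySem

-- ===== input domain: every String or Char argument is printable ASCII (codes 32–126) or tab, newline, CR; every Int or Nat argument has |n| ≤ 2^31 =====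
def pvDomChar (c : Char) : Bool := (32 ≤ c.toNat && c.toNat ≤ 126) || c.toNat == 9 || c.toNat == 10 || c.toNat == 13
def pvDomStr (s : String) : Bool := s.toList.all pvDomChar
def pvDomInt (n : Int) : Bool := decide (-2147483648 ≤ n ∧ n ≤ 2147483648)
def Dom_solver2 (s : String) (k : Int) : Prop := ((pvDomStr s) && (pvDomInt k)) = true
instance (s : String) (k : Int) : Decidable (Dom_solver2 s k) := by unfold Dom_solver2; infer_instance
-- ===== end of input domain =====

-- B avoids building the k-fold repetition: one scan of s (and of s+s) plus a closed-form scale by k; equivalence of return values proved below.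


-- ===== PORT A =====
-- literal port: t = s repeated k times, then an index loop i in range(1, len(t)) comparing t[i] with t[i-1]
def solver2 (s : String) (k : Int) : Int :=
  let t : List Char := (PySem.List.pyRange 0 k 1).foldl (fun acc _ => acc ++ s.toList) []
  let p : Int × Int := (PySem.List.pyRange 1 (t.length : Int) 1).foldl
      (fun (st : Int × Int) (i : Int) =>
        if PySem.List.pyGetD t i ' ' == PySem.List.pyGetD t (i-1) ' '    -- indices are always in range here
        then (st.1, st.2 + 1)
        else (st.1 + PySem.Int.floordiv st.2 2, (1 : Int))) ((0 : Int), (1 : Int))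
  p.1 + PySem.Int.floordiv p.2 2

-- ===== PORT B =====
-- port of Source B's helper loop `for c in s[1:]` with state (res, cnt, prev)
def pfold : List Char → Char → Int → Int → Int × Int × Char
  | [], prev, res, cnt => (res, cnt, prev)
  | c :: rest, prev, res, cnt =>
      if c == prev then pfold rest c res (cnt + 1)
      else pfold rest c (res + PySem.Int.floordiv cnt 2) 1

-- port of _f; the [] branch is unreachable from solver2_alt (Python's _f is never called on "")
def fB (cs : List Char) : Int :=
  match cs with
  | [] => 0
  | h :: tl => let p := pfold tl h 0 1; p.1 + PySem.Int.floordiv p.2.1 2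

def solver2_alt (s : String) (k : Int) : Int :=
  match s.toList with
  | [] => 0                                   -- `if not s ... : return 0`
  | c0 :: _ =>
    if k ≤ 0 then 0
    else if s.toList.all (fun c => c == c0) then
      PySem.Int.floordiv ((s.toList.length : Int) * k) 2
    else
      let base := fB s.toList
      base + (k - 1) * (fB (s.toList ++ s.toList) - base)

-- ===== PRECONDITION & SPEC =====
def Spec_solver2 (s : String) (k : Int) (out : Int) : Prop := out = solver2_alt s k
instance (s : String) (k : Int) (out : Int) : Decidable (Spec_solver2 s k out) := by unfold Spec_solver2; infer_instance

-- ===== CLAIM (what is proved, stated in full; the proofs are below) =====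
def Claim_equal_solver2 : Prop := ∀ (s : String) (k : Int), Dom_solver2 s k → Spec_solver2 s k (solver2 s k)

-- ===== LEMMAS AND PROOFS =====

-- s repeated m times
def flat (cs : List Char) (m : Nat) : List Char := (List.replicate m cs).flatten

theorem flat_zero (cs : List Char) : flat cs 0 = [] := rfl

theorem flat_succ (cs : List Char) (m : Nat) : flat cs (m+1) = cs ++ flat cs m := by
  simp [flat, List.replicate_succ]

theorem flat_succ' (cs : List Char) (m : Nat) : flat cs (m+1) = flat cs m ++ cs := by
  simp [flat, List.replicate_succ']

theorem flat_nil (m : Nat) : flat [] m = [] := by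
  induction m with
  | zero => rfl
  | succ m ih => simp [flat_succ, ih]

-- building t in A is repetition
theorem tbuild (cs : List Char) (l : List Int) (acc : List Char) :
    l.foldl (fun acc _ => acc ++ cs) acc = acc ++ flat cs l.length := by
  induction l generalizing acc with
  | nil => simp [flat_zero]
  | cons x xs ih => simp [List.foldl_cons, ih, flat_succ, List.append_assoc]

theorem pfold_append (xs ys : List Char) (prev : Char) (res cnt : Int) :
    pfold (xs ++ ys) prev res cnt
      = pfold ys (pfold xs prev res cnt).2.2 (pfold xs prev res cnt).1 (pfold xs prev res cnt).2.1 := by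
  induction xs generalizing prev res cnt with
  | nil => simp [pfold]
  | cons c rest ih =>
      simp only [List.cons_append, pfold]
      by_cases h : c == prev
      · simp only [h, if_true]; exact ih c res (cnt + 1)
      · simp only [h, Bool.false_eq_true, if_false]
        exact ih c (res + PySem.Int.floordiv cnt 2) 1

theorem pfold_res (xs : List Char) (prev : Char) (res cnt : Int) :
    pfold xs prev res cnt = ((pfold xs prev 0 cnt).1 + res, (pfold xs prev 0 cnt).2) := by
  induction xs generalizing prev res cnt with
  | nil => simp [pfold]
  | cons c rest ih =>
      simp only [pfold]
      by_cases h : c == prev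
      · simp only [h, if_true]
        exact ih c res (cnt + 1)
      · simp only [h, Bool.false_eq_true, if_false]
        rw [ih c (res + PySem.Int.floordiv cnt 2) 1, ih c (0 + PySem.Int.floordiv cnt 2) 1]
        rw [Prod.ext_iff]
        exact ⟨by ring, rfl⟩

theorem pfold_prev (xs : List Char) (prev : Char) (res cnt : Int) :
    (pfold xs prev res cnt).2.2 = xs.getLastD prev := by
  induction xs generalizing prev res cnt with
  | nil => simp [pfold]
  | cons c rest ih =>
      simp only [pfold, List.getLastD_cons]
      by_cases h : c == prev <;> simp [h, ih]

theorem pfold_const (h : Char) (m : Nat) (res cnt : Int) :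
    pfold (List.replicate m h) h res cnt = (res, cnt + m, h) := by
  induction m generalizing cnt with
  | zero => simp [pfold]
  | succ m ih =>
      simp only [List.replicate_succ, pfold, beq_self_eq_true, if_true, ih]
      rw [Prod.ext_iff, Prod.ext_iff]
      refine ⟨rfl, by push_cast; ring, rfl⟩

theorem getLastD_replicate (h prev : Char) (a : Nat) (ha : 1 ≤ a ∨ prev = h) :
    (List.replicate a h).getLastD prev = h := by
  induction a generalizing prev with
  | zero =>
      rcases ha with ha | ha
      · omega
      · simp [ha]
  | succ a ih =>
      rw [List.replicate_succ, List.getLastD_cons]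
      cases a with
      | zero => rfl
      | succ a => exact ih h (by omega)

-- tail state (cnt, prev) after scanning a string with a change is independent of the incoming state
theorem tail_state (h c : Char) (a : Nat) (v : List Char) (hc : ¬ c = h)
    (prev : Char) (res cnt : Int) (ha : 1 ≤ a ∨ prev = h) :
    (pfold (List.replicate a h ++ c :: v) prev res cnt).2 = (pfold v c 0 1).2 := by
  rw [pfold_append]
  rw [pfold_prev, getLastD_replicate h prev a ha]
  simp only [pfold, beq_iff_eq, hc, if_false]
  rw [pfold_res]

-- first change decomposition of a non-constant string
theorem split_first_change (h : Char) (tl : List Char)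
    (hna : ¬ (h :: tl).all (fun x => x == h) = true) :
    ∃ a c v, 1 ≤ a ∧ ¬ c = h ∧ h :: tl = List.replicate a h ++ c :: v := by
  induction tl with
  | nil => simp at hna
  | cons x tl' ih =>
      by_cases hx : x = h
      · subst hx
        have : ¬ (x :: tl').all (fun y => y == x) = true := by
          simp only [List.all_cons, beq_self_eq_true, Bool.true_and] at hna ⊢
          exact hna
        obtain ⟨a, c, v, ha, hc, heq⟩ := ih this
        exact ⟨a + 1, c, v, by omega, hc, by
          simp only [List.replicate_succ, List.cons_append]
          rw [← heq]⟩
      · exact ⟨1, x, tl', le_refl 1, hx, by simp [List.replicate_succ]⟩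

-- state after j extra copies of cs, for non-constant cs = h :: tl
theorem copies (h c : Char) (a : Nat) (v tl : List Char) (hc : ¬ c = h) (ha : 1 ≤ a)
    (hcs : h :: tl = List.replicate a h ++ c :: v) :
    ∀ j : Nat,
      pfold (tl ++ flat (h :: tl) j) h 0 1
        = ((pfold tl h 0 1).1 + j * (pfold (h :: tl) (pfold v c 0 1).2.2 0 (pfold v c 0 1).2.1).1,
           (pfold v c 0 1).2) := by
  have htl : (pfold tl h 0 1).2 = (pfold v c 0 1).2 := by
    have : tl = List.replicate (a - 1) h ++ c :: v := by
      cases a with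
      | zero => omega
      | succ a => simpa [List.replicate_succ] using congrArg List.tail hcs
    rw [this]
    exact tail_state h c (a-1) v hc h 0 1 (Or.inr rfl)
  intro j
  induction j with
  | zero =>
      simp only [flat_zero, List.append_nil, Nat.cast_zero, zero_mul, add_zero]
      rw [← htl]
  | succ j ih =>
      rw [flat_succ', ← List.append_assoc, pfold_append, ih]
      simp only
      rw [pfold_res, Prod.ext_iff]
      constructor
      · simp only
        push_cast
        ring
      · simp only
        rw [hcs]
        exact tail_state h c a v hc _ _ _ (Or.inl ha)

-- A's index loop equals pfold over the tail of t
theorem bridge (t : List Char) :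
    ∀ (n j : Nat) (res cnt : Int), j + n = t.length → 1 ≤ j →
      (PySem.List.pyRange (j : Int) (t.length : Int) 1).foldl
        (fun (st : Int × Int) (i : Int) =>
          if PySem.List.pyGetD t i ' ' == PySem.List.pyGetD t (i-1) ' '
          then (st.1, st.2 + 1)
          else (st.1 + PySem.Int.floordiv st.2 2, (1 : Int))) (res, cnt)
      = ((pfold (t.drop j) (t.getD (j-1) ' ') res cnt).1,
         (pfold (t.drop j) (t.getD (j-1) ' ') res cnt).2.1) := by
  intro n
  induction n with
  | zero =>
      intro j res cnt hj hj1
      have : (j : Int) = (t.length : Int) := by omega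
      rw [this, PySem.List.pyRange_one_eq_nil (le_refl _)]
      have : t.drop j = [] := by
        apply List.drop_eq_nil_of_le; omega
      simp [this, pfold]
  | succ n ih =>
      intro j res cnt hj hj1
      have hjlt : j < t.length := by omega
      rw [PySem.List.pyRange_one_cons (by exact_mod_cast hjlt)]
      simp only [List.foldl_cons]
      have hget : PySem.List.pyGetD t (j : Int) ' ' = t[j] := by
        rw [PySem.List.pyGetD_natCast]
        exact List.getD_eq_getElem t ' ' hjlt
      have hget' : PySem.List.pyGetD t ((j : Int) - 1) ' ' = t.getD (j-1) ' ' := by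
        have : (j : Int) - 1 = ((j - 1 : Nat) : Int) := by omega
        rw [this, PySem.List.pyGetD_natCast]
      have hdrop : t.drop j = t[j] :: t.drop (j+1) := by
        rw [List.drop_eq_getElem_cons hjlt]
      have hint : ((j : Int) + 1) = ((j + 1 : Nat) : Int) := by omega
      rw [hget, hget', hdrop]
      simp only [pfold]
      have hgd : t.getD ((j+1)-1) ' ' = t[j] := by
        rw [show (j+1)-1 = j from rfl]
        exact List.getD_eq_getElem t ' ' hjlt
      by_cases hcmp : t[j] == t.getD (j-1) ' '
      · simp only [hcmp, if_true]
        rw [hint, ih (j+1) res (cnt+1) (by omega) (by omega), hgd]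
      · simp only [hcmp, Bool.false_eq_true, if_false]
        rw [hint, ih (j+1) (res + PySem.Int.floordiv cnt 2) 1 (by omega) (by omega), hgd]

-- A computes fB of the repeated list
theorem A_eq (s : String) (k : Int) : solver2 s k = fB (flat s.toList k.toNat) := by
  unfold solver2
  rw [tbuild]
  have hlen : (PySem.List.pyRange 0 k 1).length = k.toNat := by
    rw [PySem.List.length_pyRange_one]; omega
  rw [hlen, List.nil_append]
  dsimp only
  cases hft : flat s.toList k.toNat with
  | nil => simp [fB, PySem.List.pyRange_one_eq_nil, PySem.Int.floordiv]
  | cons h tl =>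
      have hb := bridge (h :: tl) tl.length 1 0 1 (by simp [Nat.add_comm]) (le_refl 1)
      simp only [Nat.cast_one] at hb
      rw [hb]
      simp [fB]

theorem flat_replicate (h : Char) (n m : Nat) :
    flat (List.replicate n h) m = List.replicate (n * m) h := by
  induction m with
  | zero => simp [flat_zero]
  | succ m ih =>
      rw [flat_succ, ih, ← List.replicate_add]
      congr 1
      ring

theorem fB_replicate (h : Char) (q : Nat) (hq : 1 ≤ q) :
    fB (List.replicate q h) = PySem.Int.floordiv (q : Int) 2 := by
  cases q with
  | zero => omega
  | succ q =>
      simp only [List.replicate_succ, fB, pfold_const]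
      rw [show (0 : Int) + PySem.Int.floordiv (1 + (q : Int)) 2 = PySem.Int.floordiv (1 + (q : Int)) 2 by ring]
      congr 1
      push_cast
      ring

-- ===== VERDICT (by name: the statement is the Claim_ definition above) =====
theorem solver2_spec : Claim_equal_solver2 := by
  intro s k _
  unfold Spec_solver2
  rw [A_eq]
  cases hcs : s.toList with
  | nil => simp [solver2_alt, hcs, flat_nil, fB]
  | cons h tl =>
      simp only [solver2_alt, hcs]
      by_cases hk : k ≤ 0
      · have : k.toNat = 0 := by omega
        simp [hk, this, flat_zero, fB]
      · simp only [hk, if_false]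
        have hm : 1 ≤ k.toNat := by omega
        by_cases hall : (h :: tl).all (fun c => c == h) = true
        · -- all-same case
          simp only [hall, if_true]
          have hrep : h :: tl = List.replicate (h :: tl).length h := by
            apply List.eq_replicate_of_mem
            intro b hb
            simpa using List.all_eq_true.mp hall b hb
          rw [hrep, flat_replicate, fB_replicate h _ (by
            have h1 : 1 ≤ (h :: tl).length := by simp
            calc 1 = 1 * 1 := by omega
              _ ≤ (h :: tl).length * k.toNat := Nat.mul_le_mul h1 hm)]
          congr 1
          rw [← hrep]
          push_cast
          have : ((k.toNat : Int)) = k := by omega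
          rw [this]
        · -- non-constant case
          rw [if_neg hall]
          obtain ⟨a, c, v, ha, hc, hsplit⟩ := split_first_change h tl hall
          have hcop := copies h c a v tl hc ha hsplit
          -- abbreviations
          set r1 := (pfold tl h 0 1).1 with hr1
          set D := (pfold (h :: tl) (pfold v c 0 1).2.2 0 (pfold v c 0 1).2.1).1 with hD
          set b2 := PySem.Int.floordiv (pfold v c 0 1).2.1 2 with hb2
          -- base = fB (h :: tl)
          have hbase : fB (h :: tl) = r1 + b2 := by
            have := hcop 0
            simp only [flat_zero, List.append_nil, Nat.cast_zero, zero_mul, add_zero] at this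
            simp [fB, this, hb2]
          -- fB of the doubled string
          have hdouble : fB ((h :: tl) ++ (h :: tl)) = r1 + D + b2 := by
            have h1 : flat (h :: tl) 1 = h :: tl := by
              rw [flat_succ, flat_zero, List.append_nil]
            have := hcop 1
            rw [h1] at this
            simp only [Nat.cast_one, one_mul] at this
            simp [fB, List.cons_append, this, hb2]
          -- fB of the k-fold repetition
          have hmain : fB (flat (h :: tl) k.toNat) = r1 + ((k.toNat : Int) - 1) * D + b2 := by
            obtain ⟨m, hm'⟩ : ∃ m, k.toNat = m + 1 := ⟨k.toNat - 1, by omega⟩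
            rw [hm', flat_succ]
            simp only [List.cons_append]
            simp only [fB, hcop m, hb2]
            push_cast
            ring
          rw [hbase, hdouble, hmain]
          have : ((k.toNat : Int)) = k := by omega
          rw [this]
          ring
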